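-- pv_equiv track=rewrite | github.com/S0okJu/BOJ | Silver/1000-1999/1100-1199/1141/1141.py | solution
-- ===== SOURCE A (Python) =====
-- from collections import defaultdict
--
-- def solution(N: int, words: list) -> int:
--     grouped = defaultdict(list)
--
--     for word in words:
--         first_char = word[0]
--         grouped[first_char].append(word)
--
--     for key in grouped:
--         grouped[key] = sorted(grouped[key], key=lambda x: (x, len(x)))
--
--     prefix_count = 0
--
--     for alphabet, values in grouped.items():
--         values_len = len(values)
--         for prefix_idx in range(values_len - 1):
--             is_prefix = False
--             for target_idx in range(prefix_idx + 1, values_len):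
--                 if values[target_idx].startswith(values[prefix_idx]):
--                     is_prefix = True
--                     break
--             if is_prefix:
--                 prefix_count += 1
--
--     return N - prefix_count
-- ===== SOURCE B (Python) =====
-- def solution(N: int, words: list) -> int:
--     ordered = sorted(words)
--     return N - sum(1 if nxt.startswith(cur) else 0
--                    for cur, nxt in zip(ordered, ordered[1:]))
-- ===== Notes on version B (the rewrite author's own statement) =====
-- stated objective: faster
-- what changed: Instead of grouping by first letter and scanning, for each word, all later words of its sorted group (quadratic), B sorts the whole list once and compares each word only with its immediate successor, which suffices because any word that prefixes a later word in lexicographic order also prefixes its direct successor.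
import Mathlib
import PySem

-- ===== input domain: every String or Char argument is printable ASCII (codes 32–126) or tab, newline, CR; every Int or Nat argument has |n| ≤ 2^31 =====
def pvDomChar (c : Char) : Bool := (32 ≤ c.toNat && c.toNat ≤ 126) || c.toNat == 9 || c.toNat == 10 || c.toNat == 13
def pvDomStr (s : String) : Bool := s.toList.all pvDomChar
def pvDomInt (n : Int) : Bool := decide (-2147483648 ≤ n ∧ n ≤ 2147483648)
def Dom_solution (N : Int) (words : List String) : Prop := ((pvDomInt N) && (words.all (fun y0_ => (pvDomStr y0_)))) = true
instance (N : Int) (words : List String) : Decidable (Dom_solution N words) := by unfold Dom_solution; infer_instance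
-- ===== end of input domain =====

-- B sorts the whole list once and compares each word only with its immediate successor
-- (which suffices in lexicographic order), instead of A's per-first-letter groups each
-- scanned quadratically; proved equal on lists without empty strings (A raises there).

-- ===== PORT A =====
-- word[0]: pyGet? is none exactly for word = "" (IndexError, excluded by Pre_); .getD makes the fold total
def solGroupKey (w : String) : Char := (PySem.Str.pyGet? w 0).getD ' '

def solution (N : Int) (words : List String) : Int :=
  let grouped : PySem.Dict Char (List String) :=
    words.foldl (fun d w => d.modify (solGroupKey w) [] (fun l => l ++ [w])) PySem.Dict.empty
  let grouped2 : PySem.Dict Char (List String) :=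
    grouped.keys.foldl
      (fun d k => d.insert k (PySem.List.sorted2 (d.getD k []) (fun x => x) PySem.Str.len)) grouped
  let prefixCount : Int :=
    grouped2.items.foldl (fun acc kv =>
      let values := kv.2
      let valuesLen : Int := (values.length : Int)
      (PySem.List.pyRange 0 (valuesLen - 1)).foldl (fun acc2 pi =>
        -- 'for …: if …: is_prefix = True; break' ≡ an or-accumulator over the same range
        let isPrefix := (PySem.List.pyRange (pi + 1) valuesLen).foldl
          (fun b ti => if b then b
                       else PySem.Str.startswith (PySem.List.pyGetD values ti "")
                                                 (PySem.List.pyGetD values pi "")) false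
        if isPrefix then acc2 + 1 else acc2) acc) 0
  N - prefixCount

-- ===== PORT B =====
def solution_alt (N : Int) (words : List String) : Int :=
  let ordered := PySem.List.sorted words (fun x => x)
  N - ((ordered.zip (ordered.drop 1)).map
        (fun p => if PySem.Str.startswith p.2 p.1 then (1 : Int) else 0)).sum

-- ===== PRECONDITION & SPEC =====
-- Pre_ excludes lists containing the empty string: A raises IndexError on word[0] there.
def Pre_solution (N : Int) (words : List String) : Prop := ∀ w ∈ words, 0 < PySem.Str.len w
instance (N : Int) (words : List String) : Decidable (Pre_solution N words) := by unfold Pre_solution; infer_instance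
def pvWitness_solution : Int × List String := (3, ["ab", "a", "b"])

def Spec_solution (N : Int) (words : List String) (out : Int) : Prop := out = solution_alt N words
instance (N : Int) (words : List String) (out : Int) : Decidable (Spec_solution N words out) := by unfold Spec_solution; infer_instance

-- ===== CLAIM (what is proved, stated in full; the proofs are below) =====
def Claim_equal_solution : Prop := ∀ (N : Int) (words : List String), Dom_solution N words → Pre_solution N words → Spec_solution N words (solution N words)

-- ===== LEMMAS AND PROOFS =====

-- the per-first-letter group of words, as A's first loop builds it
def solGrp (words : List String) (c : Char) : List String :=
  words.filter (fun w => solGroupKey w == c)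

-- adjacent-prefix count, structurally
def solCR : List String → Int
  | [] => 0
  | [_] => 0
  | a :: b :: t => (if PySem.Str.startswith b a then 1 else 0) + solCR (b :: t)

-- A's per-group double loop, as a countP over the index range
def solCntA (vs : List String) : Int :=
  ((PySem.List.pyRange 0 ((vs.length : Int) - 1)).countP (fun pi =>
    (PySem.List.pyRange (pi + 1) (vs.length : Int)).any (fun ti =>
      PySem.Str.startswith (PySem.List.pyGetD vs ti "") (PySem.List.pyGetD vs pi "")) ) : Int)

-- "the word at index i+1 extends the word at index i"
def solP (l : List String) (i : Nat) : Bool :=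
  PySem.Str.startswith (PySem.List.pyGetD l ((i : Int) + 1) "") (PySem.List.pyGetD l (i : Int) "")

def solCIdx (l : List String) : Int :=
  ((List.range (l.length - 1)).countP (solP l) : Int)

theorem sol_anyFold (q : Int → Bool) : ∀ (r : List Int) (b : Bool),
    r.foldl (fun b ti => if b then b else q ti) b = (b || r.any q) := by
  intro r; induction r with
  | nil => simp
  | cons x t ih => intro b; simp [List.foldl_cons, ih]; cases b <;> simp

theorem sol_countFold (P : Int → Bool) : ∀ (r : List Int) (acc : Int),
    r.foldl (fun a pi => if P pi then a + 1 else a) acc = acc + (r.countP P : Int) := by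
  intro r; induction r with
  | nil => simp
  | cons x t ih =>
    intro acc
    by_cases h : P x <;> simp [List.foldl_cons, h, ih]; omega

theorem sol_sumFold {β : Type} (h : β → Int) : ∀ (l : List β) (acc : Int),
    l.foldl (fun a kv => a + h kv) acc = acc + (l.map h).sum := by
  intro l; induction l with
  | nil => simp
  | cons x t ih => intro acc; simp [List.foldl_cons, ih]; ring

theorem sol_cAdj_eq_cR (l : List String) :
    ((l.zip (l.drop 1)).map (fun p => if PySem.Str.startswith p.2 p.1 then (1 : Int) else 0)).sum
      = solCR l := by
  match l with
  | [] => simp [solCR]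
  | [a] => simp [solCR]
  | a :: b :: t =>
    have ih := sol_cAdj_eq_cR (b :: t)
    simp only [List.drop_succ_cons, List.drop_zero, List.zip_cons_cons, List.map_cons,
      List.sum_cons, solCR] at *
    omega

theorem sol_cR_append : ∀ (xs ys : List String),
    (∀ a ∈ xs, ∀ b ∈ ys, PySem.Str.startswith b a = false) →
    solCR (xs ++ ys) = solCR xs + solCR ys := by
  intro xs
  match xs with
  | [] => intro ys h; simp [solCR]
  | [a] =>
    intro ys h
    match ys with
    | [] => simp [solCR]
    | b :: t =>
      have hb := h a (by simp) b (by simp)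
      simp only [List.singleton_append, solCR, hb, if_neg Bool.false_ne_true, zero_add]
  | a :: a' :: xs' =>
    intro ys h
    have ih := sol_cR_append (a' :: xs') ys (fun x hx => h x (by simp [hx]))
    simp only [List.cons_append, solCR] at *
    omega

theorem sol_update_self {α : Type} [BEq α] [LawfulBEq α] :
    ∀ (l : List α) (s : PySem.Set α), (∀ x ∈ l, x ∈ s) → PySem.Set.update s l = s := by
  intro l; induction l with
  | nil => intro s h; rfl
  | cons x t ih =>
    intro s h
    have hx : x ∈ s := h x (by simp)
    have : PySem.Set.add s x = s := by
      simp [PySem.Set.add, PySem.Set.contains, hx]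
    show PySem.Set.update (PySem.Set.add s x) t = s
    rw [this]
    exact ih s (fun y hy => h y (by simp [hy]))

theorem sol_between_lists : ∀ (a b c : List Char), a ≤ b → b ≤ c → a <+: c → a <+: b := by
  intro a
  induction a with
  | nil => intro b c _ _ _; exact List.nil_prefix
  | cons x a' ih =>
    intro b c hab hbc hac
    obtain ⟨c', hc⟩ := hac
    subst hc
    match b with
    | [] =>
      exfalso
      exact absurd (List.nil_lt_cons x a') (not_lt.mpr hab)
    | y :: b' =>
      rcases lt_or_eq_of_le hab with hlt | heq
      · rw [List.cons_lt_cons_iff] at hlt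
        rcases hlt with hxy | ⟨hxyeq, htail⟩
        · exfalso
          have : (x :: a') ++ c' < y :: b' := by
            rw [List.cons_append, List.cons_lt_cons_iff]
            exact Or.inl hxy
          exact absurd this (not_lt.mpr hbc)
        · subst hxyeq
          have hbc' : b' ≤ a' ++ c' := by
            rcases lt_or_eq_of_le hbc with h | h
            · rw [List.cons_append, List.cons_lt_cons_iff] at h
              rcases h with h | ⟨_, h⟩
              · exact absurd h (lt_irrefl x)
              · exact le_of_lt h
            · rw [List.cons_append] at h
              injection h with _ h2
              exact le_of_eq h2
          have hp := ih b' (a' ++ c') (le_of_lt htail) hbc' ⟨c', rfl⟩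
          exact List.cons_prefix_cons.mpr ⟨rfl, hp⟩
      · exact heq ▸ List.prefix_refl _

theorem sol_between_str (a b c : String) (hab : a ≤ b) (hbc : b ≤ c)
    (h : PySem.Str.startswith c a = true) : PySem.Str.startswith b a = true := by
  rw [PySem.Str.startswith_eq, PySem.Chars.startswith_iff] at h ⊢
  exact sol_between_lists a.toList b.toList c.toList
    (String.le_iff_toList_le.mp hab) (String.le_iff_toList_le.mp hbc) h

theorem sol_headKey (w : String) (h : w ≠ "") : ∃ t, w.toList = solGroupKey w :: t := by
  have hnil : w.toList ≠ [] := fun hn => h (String.toList_eq_nil_iff.mp hn)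
  match hw : w.toList with
  | [] => exact absurd hw hnil
  | ch :: t =>
    refine ⟨t, ?_⟩
    rw [solGroupKey, PySem.Str.pyGet?_eq, hw]
    simp [PySem.Chars.pyGet?]

theorem sol_loop2_getD (F : List String → List String) :
    ∀ (ks : List Char) (d : PySem.Dict Char (List String)), ks.Nodup → ∀ c,
      ((ks.foldl (fun d' k => d'.insert k (F (d'.getD k []))) d).getD c [])
        = if c ∈ ks then F (d.getD c []) else d.getD c [] := by
  intro ks
  induction ks with
  | nil => intro d _ c; simp
  | cons k ks' ih =>
    intro d hnd c
    have hk : k ∉ ks' := (List.nodup_cons.mp hnd).1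
    have hnd' : ks'.Nodup := (List.nodup_cons.mp hnd).2
    simp only [List.foldl_cons]
    rw [ih (d.insert k (F (d.getD k []))) hnd' c]
    by_cases hc : c ∈ ks'
    · have hck : c ≠ k := fun h => hk (h ▸ hc)
      simp [hc, PySem.Dict.getD_insert, hck, List.mem_cons]
    · by_cases hck : c = k
      · subst hck
        simp [hc]
      · simp [hc, PySem.Dict.getD_insert, hck, List.mem_cons]

theorem sol_partition_perm (key : String → Char) :
    ∀ (cs : List Char) (l : List String), cs.Nodup → (∀ w ∈ l, key w ∈ cs) →
      l.Perm (cs.flatMap (fun c => l.filter (fun w => key w == c))) := by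
  intro cs
  induction cs with
  | nil =>
    intro l _ hcov
    match l with
    | [] => exact List.Perm.refl _
    | w :: t => exact absurd (hcov w (by simp)) (by simp)
  | cons c cs' ih =>
    intro l hnd hcov
    have hc : c ∉ cs' := (List.nodup_cons.mp hnd).1
    have hnd' : cs'.Nodup := (List.nodup_cons.mp hnd).2
    simp only [List.flatMap_cons]
    -- l ~ filter (key = c) ++ filter (key ≠ c)
    have hsplit := (List.filter_append_perm (fun w => key w == c) l).symm
    refine hsplit.trans (List.Perm.append_left _ ?_)
    -- the rest: filters over l of other keys = filters over l' of other keys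
    have hrw : cs'.flatMap (fun c' => l.filter (fun w => key w == c'))
        = cs'.flatMap (fun c' => (l.filter (fun w => !(key w == c))).filter (fun w => key w == c')) := by
      rw [List.flatMap_def, List.flatMap_def]
      congr 1
      apply List.map_congr_left
      intro c' hc'
      have hne : c' ≠ c := fun h => hc (h ▸ hc')
      rw [List.filter_filter]
      apply List.filter_congr
      intro w _
      by_cases hw : key w = c'
      · simp [hw, hne]
      · simp [hw]
    rw [hrw]
    exact ih (l.filter (fun w => !(key w == c))) hnd' (by
      intro w hw
      rw [List.mem_filter] at hw
      have := hcov w hw.1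
      rcases List.mem_cons.mp this with h | h
      · exfalso; simp [h] at hw
      · exact h)

theorem sol_pyGetD_cons_succ (a : String) (t : List String) (i : Int) (hi : 0 ≤ i) (d : String) :
    PySem.List.pyGetD (a :: t) (i + 1) d = PySem.List.pyGetD t i d := by
  obtain ⟨n, rfl⟩ := Int.eq_ofNat_of_zero_le hi
  have h : ((n : Int) + 1) = ((n + 1 : Nat) : Int) := by push_cast; ring
  rw [h, PySem.List.pyGetD_natCast, PySem.List.pyGetD_natCast]
  simp [List.getD]

theorem sol_P_cons (a : String) (t : List String) (i : Nat) :
    solP (a :: t) (i + 1) = solP t i := by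
  unfold solP
  have h1 : ((i + 1 : Nat) : Int) = (i : Int) + 1 := by push_cast; ring
  rw [h1, sol_pyGetD_cons_succ a t ((i : Int) + 1) (by positivity) "",
    sol_pyGetD_cons_succ a t (i : Int) (by positivity) ""]

theorem sol_P_zero (a b : String) (t : List String) :
    solP (a :: b :: t) 0 = PySem.Str.startswith b a := by
  unfold solP
  norm_num [PySem.List.pyGetD_ofNat']

theorem sol_cIdx_eq_cR : ∀ (l : List String), solCIdx l = solCR l := by
  intro l
  match l with
  | [] => simp [solCIdx, solCR]
  | [a] => simp [solCIdx, solCR]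
  | a :: b :: t =>
    have ih := sol_cIdx_eq_cR (b :: t)
    unfold solCIdx at *
    simp only [List.length_cons, Nat.add_sub_cancel] at *
    rw [List.range_succ_eq_map, List.countP_cons, List.countP_map]
    have hco : (solP (a :: b :: t)) ∘ Nat.succ = solP (b :: t) := by
      funext i; exact sol_P_cons a (b :: t) i
    rw [hco, sol_P_zero]
    unfold solCR
    push_cast
    by_cases h : PySem.Str.startswith b a <;> simp only [h, if_true, if_false] <;> omega

theorem sol_cntA_eq_cR (vs : List String) (hs : vs.Pairwise (· ≤ ·)) :
    solCntA vs = solCR vs := by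
  rw [← sol_cIdx_eq_cR]
  unfold solCntA solCIdx
  congr 1
  rw [PySem.List.pyRange_one, List.countP_map]
  have hto : ((vs.length : Int) - 1 - 0).toNat = vs.length - 1 := by omega
  rw [hto]
  apply List.countP_congr
  intro i hi
  rw [List.mem_range] at hi
  simp only [Function.comp, zero_add]
  have hsucc : i + 1 < vs.length := by omega
  have hgb : PySem.List.pyGetD vs ((i : Int) + 1) "" = vs[i + 1] := by
    rw [show ((i : Int) + 1) = ((i + 1 : Nat) : Int) by push_cast; ring,
      PySem.List.pyGetD_natCast, List.getD_eq_getElem _ _ hsucc]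
  have hga : PySem.List.pyGetD vs (i : Int) "" = vs[i] := by
    rw [PySem.List.pyGetD_natCast, List.getD_eq_getElem _ _ (by omega)]
  suffices heq : ((PySem.List.pyRange ((i : Int) + 1) (vs.length : Int)).any fun ti =>
      PySem.Str.startswith (PySem.List.pyGetD vs ti "") (PySem.List.pyGetD vs (i : Int) ""))
    = solP vs i by rw [heq]
  unfold solP
  rw [hga, hgb]
  have hpw := List.pairwise_iff_getElem.mp hs
  rcases hr : PySem.Str.startswith vs[i + 1] vs[i] with _ | _
  · -- RHS false: show any = false
    rw [List.any_eq_false]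
    intro ti hmem
    rw [PySem.List.mem_pyRange_one] at hmem
    obtain ⟨j, rfl⟩ := Int.eq_ofNat_of_zero_le (by omega : (0 : Int) ≤ ti)
    have hji : i + 1 ≤ j := by omega
    have hjl : j < vs.length := by omega
    rw [PySem.List.pyGetD_natCast, List.getD_eq_getElem _ _ hjl]
    intro hc
    have hab : vs[i] ≤ vs[i + 1] := hpw i (i + 1) (by omega) hsucc (by omega)
    have hbc : vs[i + 1] ≤ vs[j] := by
      rcases Nat.lt_or_ge (i + 1) j with h | h
      · exact hpw (i + 1) j hsucc hjl h
      · have : j = i + 1 := by omega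
        subst this; exact le_refl _
    have hsb := sol_between_str vs[i] vs[i+1] vs[j] hab hbc hc
    rw [hsb] at hr
    exact absurd hr (by decide)
  · -- RHS true: successor witnesses the any
    rw [List.any_eq_true]
    refine ⟨(i : Int) + 1, PySem.List.mem_pyRange_one.mpr ⟨le_refl _, by omega⟩, ?_⟩
    rw [hgb]
    exact hr

theorem sol_sorted2_eq (l : List String) :
    PySem.List.sorted2 l (fun x => x) PySem.Str.len = PySem.List.sorted l (fun x => x) := by
  unfold PySem.List.sorted2 PySem.List.sorted
  simp only []
  have hfun : (fun (a b : String) => decide (a < b) || (!decide (b < a) && decide (PySem.Str.len a < PySem.Str.len b)))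
      = (fun (a b : String) => decide (a < b)) := by
    funext a b
    rcases lt_trichotomy a b with h | h | h
    · simp [h, asymm h]
    · subst h; simp
    · simp [h, asymm h]
  rw [if_neg (by decide), if_neg (by decide), hfun]

theorem sol_flatMap_perm_congr {α β : Type} (cs : List α) (f g : α → List β)
    (h : ∀ c ∈ cs, (f c).Perm (g c)) : (cs.flatMap f).Perm (cs.flatMap g) := by
  induction cs with
  | nil => exact List.Perm.refl _
  | cons c cs' ih =>
    simp only [List.flatMap_cons]
    exact (h c (by simp)).append (ih (fun c' hc' => h c' (by simp [hc'])))

theorem sol_cR_flatMap (B : Char → List String) :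
    ∀ (cs : List Char),
      cs.Pairwise (fun c c' => ∀ a ∈ B c, ∀ b ∈ B c', PySem.Str.startswith b a = false) →
      solCR (cs.flatMap B) = (cs.map (fun c => solCR (B c))).sum := by
  intro cs
  induction cs with
  | nil => intro _; simp [solCR]
  | cons c cs' ih =>
    intro hp
    rcases List.pairwise_cons.mp hp with ⟨hhead, htail⟩
    simp only [List.flatMap_cons, List.map_cons, List.sum_cons]
    rw [sol_cR_append (B c) (cs'.flatMap B) ?cross, ih htail]
    case cross =>
      intro a ha b hb
      rw [List.mem_flatMap] at hb
      obtain ⟨c', hc', hbc'⟩ := hb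
      exact hhead c' hc' a ha b hbc'

theorem solution_eq (N : Int) (words : List String) (hpre : ∀ w ∈ words, w ≠ "") :
    solution N words = solution_alt N words := by
  unfold solution solution_alt
  simp only []
  rw [sol_cAdj_eq_cR]
  congr 1
  -- names
  set G := words.foldl (fun d w => d.modify (solGroupKey w) [] (fun l => l ++ [w])) PySem.Dict.empty with hG
  set F : List String → List String := fun l => PySem.List.sorted2 l (fun x => x) PySem.Str.len with hF
  set G2 := G.keys.foldl (fun d k => d.insert k (F (d.getD k []))) G with hG2
  -- (1) group contents
  have hgetD : ∀ c, G.getD c [] = solGrp words c := by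
    intro c
    have hrw : (List.foldl (fun d w => d.modify (solGroupKey w) [] fun l => l ++ [w])
        PySem.Dict.empty words)
        = List.foldl (fun d (p : Char × String) => d.modify p.1 [] (fun l => l ++ [p.2]))
            PySem.Dict.empty (words.map (fun w => (solGroupKey w, w))) := by
      rw [List.foldl_map]
    rw [hG, hrw, PySem.Dict.getD_foldl_modify_append]
    simp [solGrp, List.filter_map, Function.comp_def]
  -- (2) keys
  have hkeys : G.keys = PySem.Set.ofList (words.map solGroupKey) := by
    rw [hG, PySem.Dict.keys_foldl_modify_key words solGroupKey [] (fun _ w => fun l => l ++ [w])]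
    rfl
  have hnod : G.keys.Nodup := hkeys ▸ PySem.Set.nodup_ofList _
  -- (4) second loop
  have hG2getD : ∀ c ∈ G.keys, G2.getD c [] = F (solGrp words c) := by
    intro c hc
    rw [hG2, sol_loop2_getD F G.keys G hnod c, if_pos hc, hgetD]
  have hG2keys : G2.keys = G.keys := by
    rw [hG2, PySem.Dict.keys_foldl_insert]
    exact sol_update_self G.keys G.keys (fun x hx => hx)
  have hG2nod : G2.keys.Nodup := hG2keys ▸ hnod
  -- (6) the triple loop is a sum of per-group counts
  have hloop : (G2.items.foldl (fun acc kv =>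
      (PySem.List.pyRange 0 ((kv.2.length : Int) - 1)).foldl (fun acc2 pi =>
        if (PySem.List.pyRange (pi + 1) (kv.2.length : Int)).foldl
          (fun b ti => if b then b
                       else PySem.Str.startswith (PySem.List.pyGetD kv.2 ti "")
                                                 (PySem.List.pyGetD kv.2 pi "")) false
        then acc2 + 1 else acc2) acc) 0)
      = (G2.items.map (fun kv => solCntA kv.2)).sum := by
    have hbody : (fun (acc : Int) (kv : Char × List String) =>
        (PySem.List.pyRange 0 ((kv.2.length : Int) - 1)).foldl (fun acc2 pi =>
          if (PySem.List.pyRange (pi + 1) (kv.2.length : Int)).foldl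
            (fun b ti => if b then b
                         else PySem.Str.startswith (PySem.List.pyGetD kv.2 ti "")
                                                   (PySem.List.pyGetD kv.2 pi "")) false
          then acc2 + 1 else acc2) acc)
        = (fun acc kv => acc + solCntA kv.2) := by
      funext acc kv
      have hin : (fun (acc2 : Int) (pi : Int) =>
          if (PySem.List.pyRange (pi + 1) (kv.2.length : Int)).foldl
            (fun b ti => if b then b
                         else PySem.Str.startswith (PySem.List.pyGetD kv.2 ti "")
                                                   (PySem.List.pyGetD kv.2 pi "")) false
          then acc2 + 1 else acc2)
          = (fun acc2 pi =>
            if (PySem.List.pyRange (pi + 1) (kv.2.length : Int)).any (fun ti =>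
              PySem.Str.startswith (PySem.List.pyGetD kv.2 ti "") (PySem.List.pyGetD kv.2 pi ""))
            then acc2 + 1 else acc2) := by
        funext acc2 pi
        rw [sol_anyFold, Bool.false_or]
      rw [hin, sol_countFold]
      rfl
    rw [hbody, sol_sumFold (fun kv => solCntA kv.2) G2.items 0]
    simp
  rw [hloop]
  -- (5,7) rewrite the sum over items as a sum over keys of sorted groups
  rw [PySem.Dict.items_eq_map_keys G2 hG2nod []]
  rw [List.map_map]
  have hmap : (G2.keys.map ((fun kv : Char × List String => solCntA kv.2) ∘ (fun k => (k, G2.getD k []))))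
      = G2.keys.map (fun k => solCR (PySem.List.sorted (solGrp words k) (fun x => x))) := by
    apply List.map_congr_left
    intro k hk
    rw [hG2keys] at hk
    simp only [Function.comp]
    rw [hG2getD k hk, hF]
    simp only []
    rw [sol_sorted2_eq]
    exact sol_cntA_eq_cR _ (by
      have := PySem.List.sorted_pairwise (solGrp words k) (fun x => x)
      exact this)
  rw [hmap, hG2keys, hkeys]
  -- now the right-hand side: sorted words = flatMap of sorted groups over sorted keys
  set cs := PySem.List.sorted (PySem.Set.ofList (words.map solGroupKey)) (fun x => x) with hcs
  have hcslt : cs.Pairwise (· < ·) := PySem.List.sorted_ofList_pairwise_lt _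
  have hcsnd : cs.Nodup := hcslt.imp (fun h => ne_of_lt h)
  set B : Char → List String := fun c => PySem.List.sorted (solGrp words c) (fun x => x) with hB
  -- every member of block c is a word whose first character is c
  have hblk : ∀ c, ∀ x ∈ B c, x ∈ words ∧ ∃ t, x.toList = c :: t := by
    intro c x hx
    rw [hB] at hx
    simp only [] at hx
    rw [PySem.List.mem_sorted] at hx
    unfold solGrp at hx
    rw [List.mem_filter] at hx
    obtain ⟨hxw, hxc⟩ := hx
    have hkeq : solGroupKey x = c := by simpa using hxc
    obtain ⟨t, ht⟩ := sol_headKey x (hpre x hxw)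
    exact ⟨hxw, t, hkeq ▸ ht⟩
  have hcov : ∀ w ∈ words, solGroupKey w ∈ cs := by
    intro w hw
    rw [hcs, PySem.List.mem_sorted, PySem.Set.mem_ofList]
    exact List.mem_map_of_mem hw
  -- the sorted word list is the concatenation of the per-letter sorted blocks
  have hflatperm : (cs.flatMap B).Perm words := by
    refine (sol_flatMap_perm_congr cs B (fun c => solGrp words c)
      (fun c _ => PySem.List.sorted_perm _ _ _)).trans ?_
    exact (sol_partition_perm solGroupKey cs words hcsnd hcov).symm
  have hflatpw : (cs.flatMap B).Pairwise (· ≤ ·) := by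
    rw [List.flatMap_def, List.pairwise_flatten]
    constructor
    · intro l hl
      rw [List.mem_map] at hl
      obtain ⟨c, _, rfl⟩ := hl
      exact PySem.List.sorted_pairwise _ _
    · rw [List.pairwise_map]
      refine hcslt.imp_of_mem ?_
      intro c c' hc hc' hlt x hxb y hyb
      obtain ⟨hxw, tx, htx⟩ := hblk c x hxb
      obtain ⟨hyw, ty, hty⟩ := hblk c' y hyb
      refine le_of_lt ?_
      rw [String.lt_iff_toList_lt, htx, hty]
      exact List.cons_lt_cons_iff.mpr (Or.inl hlt)
  have hsortedflat : PySem.List.sorted words (fun x => x) = cs.flatMap B :=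
    PySem.List.sorted_id_eq_of_perm_of_pairwise words (cs.flatMap B) hflatperm hflatpw
  have hcross : cs.Pairwise (fun c c' => ∀ a ∈ B c, ∀ b ∈ B c',
      PySem.Str.startswith b a = false) := by
    refine hcslt.imp_of_mem ?_
    intro c c' hc hc' hlt a hab b hbb
    obtain ⟨_, ta, hta⟩ := hblk c a hab
    obtain ⟨_, tb, htb⟩ := hblk c' b hbb
    by_contra hne
    have htrue : PySem.Str.startswith b a = true := by
      cases h : PySem.Str.startswith b a
      · exact absurd h hne
      · rfl
    rw [PySem.Str.startswith_eq, PySem.Chars.startswith_iff, hta, htb] at htrue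
    obtain ⟨u, hu⟩ := htrue
    rw [List.cons_append] at hu
    injection hu with h1 _
    exact absurd h1 (ne_of_lt hlt)
  rw [hsortedflat, sol_cR_flatMap B cs hcross]
  -- finally: sum over the key set = sum over the sorted key set
  have hps : (PySem.Set.ofList (words.map solGroupKey)).Perm cs := (PySem.List.sorted_perm _ _ _).symm
  exact (hps.map (fun k => solCR (B k))).sum_eq

-- ===== VERDICT (by name: the statement is the Claim_ definition above) =====
theorem solution_spec : Claim_equal_solution := by
  intro N words _ hpre
  unfold Spec_solution
  refine solution_eq N words (fun w hw he => ?_)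
  have := hpre w hw
  rw [he] at this
  simp [PySem.Str.len] at this
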